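-- pv_equiv track=rewrite | github.com/Well2333/arknights-mower | docker/gen_server_requirements.py | split_req
-- ===== SOURCE A (Python) =====
-- from typing import Iterable, Tuple
--
-- def split_req(line: str) -> Tuple[str, str]:
--     """Split a requirement into (name, rest).
--
--     "rest" contains version specifiers / extras and leading whitespace is preserved.
--     """
--
--     # Remove inline comments for name parsing only
--     trimmed = line.split("#", 1)[0].strip()
--     if not trimmed:
--         return "", line
--
--     # Identify name part up to version/extras separators
--     separators = ["==", ">=", "<=", "!=", "~=", "<", ">", "[", " "]
--     idx = len(trimmed)
--     for sep in separators:
--         pos = trimmed.find(sep)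
--         if pos != -1:
--             idx = min(idx, pos)
--     name = trimmed[:idx]
--     return name.lower(), line
-- ===== SOURCE B (Python) =====
-- def split_req(line):
--     """Split a requirement into (name, rest) — single forward scan with lookahead instead of nine find() passes + min."""
--     trimmed = line.split("#", 1)[0].strip()
--     if not trimmed:
--         return "", line
--     idx = len(trimmed)
--     for i, c in enumerate(trimmed):
--         if c in "<>[ " or (c in "=!~" and trimmed[i + 1:i + 2] == "="):
--             idx = i
--             break
--     return trimmed[:idx].lower(), line
-- ===== Notes on version B (the rewrite author's own statement) =====
-- stated objective: alternative
-- what changed: A locates the name boundary by running nine separate substring find() scans over the trimmed string and taking the minimum position; B makes a single forward scan with a one-character lookahead for the two-char operators, stopping at the first separator start (in CPython A's C-level find() calls are faster in practice).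
import Mathlib
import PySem

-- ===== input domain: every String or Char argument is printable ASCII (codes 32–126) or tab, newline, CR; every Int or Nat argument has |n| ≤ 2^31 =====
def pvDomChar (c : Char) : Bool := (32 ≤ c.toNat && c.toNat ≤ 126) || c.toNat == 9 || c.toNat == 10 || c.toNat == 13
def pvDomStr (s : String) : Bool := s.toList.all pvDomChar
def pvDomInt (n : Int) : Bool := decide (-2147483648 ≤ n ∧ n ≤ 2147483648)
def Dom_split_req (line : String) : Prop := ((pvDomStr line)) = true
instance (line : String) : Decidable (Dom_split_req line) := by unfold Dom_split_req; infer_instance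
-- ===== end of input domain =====

-- B replaces A's nine separate find() scans + min with one forward scan over the trimmed
-- string (a one-char lookahead for the two-char operators); an alternative single-pass
-- strategy, same return value everywhere.

-- ===== PORT A =====
def split_req (line : String) : String × String :=
  let trimmed := PySem.Str.strip (((PySem.Str.splitMax? line "#" 1).getD []).headD "")
  if trimmed = "" then ("", line)
  else
    let seps : List String := ["==", ">=", "<=", "!=", "~=", "<", ">", "[", " "]
    let idx : Int := seps.foldl (fun idx sep =>
      let pos := PySem.Str.find trimmed sep
      if pos ≠ -1 then min idx pos else idx) (PySem.Str.len trimmed)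
    let name := PySem.Str.slice trimmed none (some idx)
    (PySem.Str.lower name, line)

-- ===== PORT B =====
-- is the next character '='? (B's lookahead trimmed[i+1:i+2] == "=")
def pvIsEqHead : List Char → Bool
  | [] => false
  | c :: _ => c == '='

-- B's single forward scan: index of the first separator start, or the length.
def pvSepScan : List Char → Nat
  | [] => 0
  | c :: rest =>
    if c = '<' ∨ c = '>' ∨ c = '[' ∨ c = ' ' then 0
    else if (c = '=' ∨ c = '!' ∨ c = '~') ∧ pvIsEqHead rest = true then 0
    else pvSepScan rest + 1

def split_req_alt (line : String) : String × String :=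
  let trimmed := PySem.Str.strip (((PySem.Str.splitMax? line "#" 1).getD []).headD "")
  if trimmed = "" then ("", line)
  else
    let t := trimmed.toList
    (String.ofList (PySem.Chars.lower (t.take (pvSepScan t))), line)

-- ===== PRECONDITION & SPEC =====
def Spec_split_req (line : String) (out : String × String) : Prop := out = split_req_alt line
instance (line : String) (out : String × String) : Decidable (Spec_split_req line out) := by unfold Spec_split_req; infer_instance

-- ===== CLAIM (what is proved, stated in full; the proofs are below) =====
def Claim_equal_split_req : Prop := ∀ (line : String), Dom_split_req line → Spec_split_req line (split_req line)

-- ===== LEMMAS AND PROOFS =====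

-- A's fold over a list of separator char-lists
def pvGfold (L : List (List Char)) (t : List Char) (init : Int) : Int :=
  L.foldl (fun idx sub =>
    let pos := PySem.Chars.find t sub
    if pos ≠ -1 then min idx pos else idx) init

def pvSepsL : List (List Char) := [['=','='], ['>','='], ['<','='], ['!','='], ['~','='], ['<'], ['>'], ['['], [' ']]

lemma pvGfold_nil (t : List Char) (init : Int) : pvGfold [] t init = init := rfl

lemma pvGfold_cons (s : List Char) (L : List (List Char)) (t : List Char) (init : Int) :
    pvGfold (s :: L) t init =
      pvGfold L t (if PySem.Chars.find t s = -1 then init else min init (PySem.Chars.find t s)) := by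
  simp only [pvGfold, List.foldl]
  congr 1
  split_ifs <;> simp_all

lemma pv_go_cases (sub t : List Char) (k : Nat) :
    PySem.Chars.find.go sub t k = -1 ∨ (k : Int) ≤ PySem.Chars.find.go sub t k := by
  induction t generalizing k with
  | nil => by_cases he : sub.isEmpty <;> simp [PySem.Chars.find.go, he]
  | cons c t ih =>
    by_cases h : sub.isPrefixOf (c :: t)
    · right; simp [PySem.Chars.find.go, h]
    · rw [show PySem.Chars.find.go sub (c :: t) k = PySem.Chars.find.go sub t (k + 1) by
        simp [PySem.Chars.find.go, h]]
      rcases ih (k + 1) with h1 | h1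
      · exact Or.inl h1
      · right; omega

lemma pv_go_eq (sub t : List Char) (k : Nat) :
    PySem.Chars.find.go sub t k =
      if PySem.Chars.find.go sub t 0 = -1 then -1 else PySem.Chars.find.go sub t 0 + k := by
  induction t generalizing k with
  | nil => by_cases he : sub.isEmpty <;> simp [PySem.Chars.find.go, he]
  | cons c t ih =>
    by_cases h : sub.isPrefixOf (c :: t)
    · simp [PySem.Chars.find.go, h]
    · rw [show PySem.Chars.find.go sub (c :: t) k = PySem.Chars.find.go sub t (k + 1) by
        simp [PySem.Chars.find.go, h],
        show PySem.Chars.find.go sub (c :: t) 0 = PySem.Chars.find.go sub t 1 by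
        simp [PySem.Chars.find.go, h]]
      rw [ih (k + 1), ih 1]
      rcases pv_go_cases sub t 0 with h1 | h1
      · simp [h1]
      · have h2 : PySem.Chars.find.go sub t 0 ≠ -1 := by omega
        have h3 : PySem.Chars.find.go sub t 0 + (1 : Int) ≠ -1 := by omega
        rw [if_neg h2, if_neg h2, if_neg (by push_cast; omega :
          ¬ PySem.Chars.find.go sub t 0 + ((1 : Nat) : Int) = -1)]
        push_cast
        ring

lemma pv_find_bounds (t sub : List Char) :
    PySem.Chars.find t sub = -1 ∨ 0 ≤ PySem.Chars.find t sub := by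
  simpa [PySem.Chars.find] using pv_go_cases sub t 0

lemma pv_find_cons (c : Char) (t sub : List Char) :
    PySem.Chars.find (c :: t) sub =
      if sub.isPrefixOf (c :: t) then 0
      else if PySem.Chars.find t sub = -1 then -1 else PySem.Chars.find t sub + 1 := by
  by_cases h : sub.isPrefixOf (c :: t)
  · simp [PySem.Chars.find, PySem.Chars.find.go, h]
  · rw [show PySem.Chars.find (c :: t) sub = PySem.Chars.find.go sub t 1 by
      simp [PySem.Chars.find, PySem.Chars.find.go, h]]
    rw [pv_go_eq]
    simp [PySem.Chars.find, h]

lemma pv_find_zero_iff (t sub : List Char) :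
    PySem.Chars.find t sub = 0 ↔ sub.isPrefixOf t = true := by
  cases t with
  | nil =>
    cases sub <;> simp [PySem.Chars.find, PySem.Chars.find.go, List.isPrefixOf]
  | cons c t =>
    rw [pv_find_cons]
    by_cases h : sub.isPrefixOf (c :: t)
    · simp [h]
    · have hne : (if PySem.Chars.find t sub = -1 then (-1 : Int)
          else PySem.Chars.find t sub + 1) ≠ 0 := by
        rcases pv_find_bounds t sub with h1 | h1 <;> split_ifs <;> omega
      simp [h, hne]

lemma pv_gfold_bounds (L : List (List Char)) (t : List Char) (init : Int) (h : 0 ≤ init) :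
    0 ≤ pvGfold L t init ∧ pvGfold L t init ≤ init := by
  induction L generalizing init with
  | nil => simp [pvGfold_nil]; omega
  | cons s L ih =>
    rw [pvGfold_cons]
    have hinit : 0 ≤ (if PySem.Chars.find t s = -1 then init else min init (PySem.Chars.find t s)) ∧
        (if PySem.Chars.find t s = -1 then init else min init (PySem.Chars.find t s)) ≤ init := by
      rcases pv_find_bounds t s with h1 | h1 <;> split_ifs <;> omega
    have := ih _ hinit.1
    omega

lemma pv_gfold_zero (L : List (List Char)) (t : List Char) (init : Int) (h : 0 ≤ init)
    (hz : ∃ sub ∈ L, PySem.Chars.find t sub = 0) : pvGfold L t init = 0 := by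
  induction L generalizing init with
  | nil => simp at hz
  | cons s L ih =>
    rw [pvGfold_cons]
    rcases hz with ⟨sub, hmem, hsub⟩
    rcases List.mem_cons.mp hmem with rfl | hmem
    · rw [hsub]
      have h0 : (if (0 : Int) = -1 then init else min init 0) = 0 := by norm_num; omega
      rw [h0]
      have := pv_gfold_bounds L t 0 le_rfl
      omega
    · have hinit : 0 ≤ (if PySem.Chars.find t s = -1 then init else min init (PySem.Chars.find t s)) := by
        rcases pv_find_bounds t s with h1 | h1 <;> split_ifs <;> omega
      exact ih _ hinit ⟨sub, hmem, hsub⟩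

lemma pv_gfold_shift (L : List (List Char)) (c : Char) (t : List Char) (j : Int)
    (h : ∀ sub ∈ L, sub.isPrefixOf (c :: t) = false) :
    pvGfold L (c :: t) (j + 1) = pvGfold L t j + 1 := by
  induction L generalizing j with
  | nil => simp [pvGfold_nil]
  | cons s L ih =>
    have hs : s.isPrefixOf (c :: t) = false := h s (List.mem_cons_self ..)
    have hL : ∀ sub ∈ L, sub.isPrefixOf (c :: t) = false :=
      fun sub hm => h sub (List.mem_cons_of_mem _ hm)
    rw [pvGfold_cons, pvGfold_cons, pv_find_cons, hs]
    simp only [Bool.false_eq_true, if_false]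
    rcases pv_find_bounds t s with h1 | h1
    · simp only [h1, if_pos]
      exact ih j hL
    · have h2 : PySem.Chars.find t s ≠ -1 := by omega
      have h3 : (if PySem.Chars.find t s = -1 then (-1 : Int) else PySem.Chars.find t s + 1) =
          PySem.Chars.find t s + 1 := by rw [if_neg h2]
      rw [h3]
      have h4 : PySem.Chars.find t s + (1 : Int) ≠ -1 := by omega
      rw [if_neg h4, if_neg h2]
      have h5 : min (j + 1) (PySem.Chars.find t s + 1) = min j (PySem.Chars.find t s) + 1 := by omega
      rw [h5]
      exact ih _ hL

set_option maxHeartbeats 1000000 in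
set_option maxRecDepth 8192 in
lemma pv_pref_iff (c : Char) (t : List Char) :
    (∃ sub ∈ pvSepsL, sub.isPrefixOf (c :: t) = true) ↔
      ((c = '<' ∨ c = '>' ∨ c = '[' ∨ c = ' ') ∨
        ((c = '=' ∨ c = '!' ∨ c = '~') ∧ pvIsEqHead t = true)) := by
  cases t <;> simp [pvSepsL, pvIsEqHead]
  · constructor
    · rintro (rfl | rfl | rfl | rfl) <;> simp
    · rintro (rfl | rfl | rfl | rfl) <;> simp
  · constructor
    · rintro (⟨rfl, rfl⟩ | ⟨rfl, rfl⟩ | ⟨rfl, rfl⟩ | ⟨rfl, rfl⟩ | ⟨rfl, rfl⟩ | rfl | rfl | rfl | rfl) <;> simp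
    · rintro ((rfl | rfl | rfl | rfl) | ⟨(rfl | rfl | rfl), rfl⟩) <;> simp

lemma pv_main (t : List Char) : pvGfold pvSepsL t (t.length : Int) = (pvSepScan t : Int) := by
  induction t with
  | nil => decide
  | cons c t ih =>
    by_cases h : ((c = '<' ∨ c = '>' ∨ c = '[' ∨ c = ' ') ∨
        ((c = '=' ∨ c = '!' ∨ c = '~') ∧ pvIsEqHead t = true))
    · rcases (pv_pref_iff c t).mpr h with ⟨sub, hmem, hpref⟩
      rw [pv_gfold_zero pvSepsL (c :: t) _ (by positivity)
        ⟨sub, hmem, (pv_find_zero_iff _ _).mpr hpref⟩]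
      have hscan : pvSepScan (c :: t) = 0 := by
        rcases h with h1 | h2
        · rw [pvSepScan, if_pos h1]
        · have h1' : ¬ (c = '<' ∨ c = '>' ∨ c = '[' ∨ c = ' ') := by
            rcases h2.1 with rfl | rfl | rfl <;> simp
          rw [pvSepScan, if_neg h1', if_pos h2]
      rw [hscan]
      rfl
    · have hnp : ∀ sub ∈ pvSepsL, sub.isPrefixOf (c :: t) = false := by
        intro sub hm
        by_contra hc
        exact h ((pv_pref_iff c t).mp ⟨sub, hm, by simpa using hc⟩)
      have h1 : ¬ (c = '<' ∨ c = '>' ∨ c = '[' ∨ c = ' ') := fun hh => h (Or.inl hh)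
      have h2 : ¬ ((c = '=' ∨ c = '!' ∨ c = '~') ∧ pvIsEqHead t = true) := fun hh => h (Or.inr hh)
      rw [show ((c :: t).length : Int) = (t.length : Int) + 1 by simp]
      rw [pv_gfold_shift pvSepsL c t _ hnp, ih]
      rw [pvSepScan, if_neg h1, if_neg h2]
      push_cast
      ring

lemma pv_branch (trimmed line : String) :
    (if trimmed = "" then (("", line) : String × String)
     else
       ((PySem.Str.lower (PySem.Str.slice trimmed none
          (some ((["==", ">=", "<=", "!=", "~=", "<", ">", "[", " "] : List String).foldl
            (fun idx sep =>
              let pos := PySem.Str.find trimmed sep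
              if pos ≠ -1 then min idx pos else idx) (PySem.Str.len trimmed))))), line)) =
    (if trimmed = "" then ("", line)
     else (String.ofList (PySem.Chars.lower
        (trimmed.toList.take (pvSepScan trimmed.toList))), line)) := by
  by_cases h : trimmed = ""
  · rw [if_pos h, if_pos h]
  · rw [if_neg h, if_neg h]
    have hfold : (["==", ">=", "<=", "!=", "~=", "<", ">", "[", " "] : List String).foldl
        (fun idx sep =>
          let pos := PySem.Str.find trimmed sep
          if pos ≠ -1 then min idx pos else idx) (PySem.Str.len trimmed)
        = pvGfold pvSepsL trimmed.toList (trimmed.toList.length : Int) := by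
      rw [show pvSepsL = (["==", ">=", "<=", "!=", "~=", "<", ">", "[", " "] : List String).map
        String.toList from rfl]
      rw [pvGfold, List.foldl_map]
      rfl
    rw [hfold, pv_main]
    refine Prod.ext ?_ rfl
    apply String.toList_inj.mp
    simp only [PySem.Str.toList_lower, PySem.Str.toList_slice, String.toList_ofList,
      PySem.Chars.slice, PySem.List.slice_to_natCast]

-- ===== VERDICT (by name: the statement is the Claim_ definition above) =====
theorem split_req_spec : Claim_equal_split_req := by
  intro line _
  exact pv_branch (PySem.Str.strip (((PySem.Str.splitMax? line "#" 1).getD []).headD "")) line
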